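-- pv_equiv track=rewrite | github.com/jjoshua2/arc_agi | unsolved/2025-10-11T04-29-28Z/e5062a87_best1.py | transform
-- ===== SOURCE A (Python) =====
-- def transform(grid: list[list[int]]) -> list[list[int]]:
--     if not grid or not grid[0]:
--         return []
--     h = len(grid)
--     w = len(grid[0])
--     # find red positions
--     red_positions = [(i, j) for i in range(h) for j in range(w) if grid[i][j] == 2]
--     if not red_positions:
--         return [row[:] for row in grid]
--     min_r = min(i for i, j in red_positions)
--     max_r = max(i for i, j in red_positions)
--     min_c = min(j for i, j in red_positions)
--     max_c = max(j for i, j in red_positions)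
--     # find accents
--     accents = [(i, j, grid[i][j]) for i in range(h) for j in range(w) if grid[i][j] != 0 and grid[i][j] != 2]
--     out = [row[:] for row in grid]
--     # upper
--     upper_accent_cols = {j for i, j, col in accents if i < min_r}
--     fill_cols_upper = {j for j in range(min_c, max_c + 1) if j not in upper_accent_cols}
--     for i in range(min_r):
--         for j in range(w):
--             if out[i][j] == 0 and j in fill_cols_upper:
--                 out[i][j] = 2
--     # lower
--     lower_accent_cols = {j for i, j, col in accents if i > max_r}
--     fill_cols_lower = {j for j in range(min_c, max_c + 1) if j not in lower_accent_cols}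
--     for i in range(max_r + 1, h):
--         for j in range(w):
--             if out[i][j] == 0 and j in fill_cols_lower:
--                 out[i][j] = 2
--     # main rows
--     for i in range(min_r, max_r + 1):
--         row_accents = [(j, grid[i][j]) for j in range(w) if grid[i][j] != 0 and grid[i][j] != 2]
--         if not row_accents:
--             # full fill
--             for j in range(w):
--                 if out[i][j] == 0:
--                     out[i][j] = 2
--             continue
--         # has accent
--         has_left = any(j < min_c for j, col in row_accents)
--         has_right = any(j > max_c for j, col in row_accents)
--         if has_right:
--             for j in range(max_c + 1):
--                 if out[i][j] == 0:
--                     out[i][j] = 2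
--         if has_left:
--             for j in range(min_c, w):
--                 if out[i][j] == 0:
--                     out[i][j] = 2
--     return out
-- ===== SOURCE B (Python) =====
-- def transform(grid: list[list[int]]) -> list[list[int]]:
--     if not grid or not grid[0]:
--         return []
--     h = len(grid)
--     w = len(grid[0])
--     red_rows = [i for i in range(h) if any(grid[i][j] == 2 for j in range(w))]
--     if not red_rows:
--         return [row[:] for row in grid]
--     red_cols = [j for j in range(w) if any(grid[i][j] == 2 for i in range(h))]
--     lo, hi = red_rows[0], red_rows[-1]
--     left, right = red_cols[0], red_cols[-1]
--
--     def accent(i, j):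
--         return grid[i][j] != 0 and grid[i][j] != 2
--
--     def paint(i, j):
--         # pure pointwise rule: does cell (i, j) get painted red?
--         if i < lo:
--             return left <= j <= right and not any(accent(r, j) for r in range(lo))
--         if i > hi:
--             return left <= j <= right and not any(accent(r, j) for r in range(hi + 1, h))
--         if not any(accent(i, c) for c in range(w)):
--             return True
--         return (j <= right and any(accent(i, c) for c in range(right + 1, w))) or \
--                (left <= j and any(accent(i, c) for c in range(left)))
--
--     return [[2 if grid[i][j] == 0 and paint(i, j) else grid[i][j]
--              for j in range(w)] for i in range(h)]
-- ===== Notes on version B (the rewrite author's own statement) =====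
-- stated objective: alternative
-- what changed: A precomputes accent-column sets and paints by three region-specific in-place mutation loops (upper, lower, main rows with conditional sub-loops); B has no sets and no mutation: it derives the bounding box from row/column scans and builds the output with one pure per-cell predicate paint(i,j) that decides on demand, by direct scans, whether that single cell turns red.
-- outside the precondition, e.g. on transform([[2, 0], [0, 0, 5]]): A returns [[2, 2], [2, 0, 5]], B returns [[2, 2], [2, 0]]
import Mathlib
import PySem

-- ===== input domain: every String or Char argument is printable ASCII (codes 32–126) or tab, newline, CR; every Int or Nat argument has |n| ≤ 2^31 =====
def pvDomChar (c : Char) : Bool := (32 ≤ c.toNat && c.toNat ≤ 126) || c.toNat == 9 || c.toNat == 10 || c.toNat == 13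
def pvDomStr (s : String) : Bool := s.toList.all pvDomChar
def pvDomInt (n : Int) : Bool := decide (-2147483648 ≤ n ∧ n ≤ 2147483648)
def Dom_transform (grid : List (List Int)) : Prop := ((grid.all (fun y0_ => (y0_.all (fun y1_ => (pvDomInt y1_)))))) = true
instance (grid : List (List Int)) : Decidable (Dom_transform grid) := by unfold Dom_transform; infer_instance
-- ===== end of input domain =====

-- B replaces A's precomputed accent-column sets and three region-specific mutation loops by a
-- single pure per-cell predicate deciding on demand whether each cell turns red (objective: alternative).

-- ===== PORT A =====
def aCell (grid : List (List Int)) (i j : Nat) : Int := (grid.getD i []).getD j 0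

-- 'for j in js: if out_row[j] == 0 and c j: out_row[j] = 2' acting on the row object out[i]
def aFill (js : List Nat) (c : Nat → Bool) (row : List Int) : List Int :=
  js.foldl (fun r j => if r.getD j 0 == 0 && c j then r.set j 2 else r) row

def aReds (grid : List (List Int)) (h w : Nat) : List (Nat × Nat) :=
  (List.range h).flatMap (fun i =>
    ((List.range w).filter (fun j => aCell grid i j == 2)).map (fun j => (i, j)))

def aAccents (grid : List (List Int)) (h w : Nat) : List (Nat × Nat × Int) :=
  (List.range h).flatMap (fun i =>
    ((List.range w).filter (fun j => !(aCell grid i j == 0) && !(aCell grid i j == 2))).map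
      (fun j => (i, j, aCell grid i j)))

def aMinR (reds : List (Nat × Nat)) : Nat := (PySem.List.min? (reds.map (fun p => p.1)) (fun x => x)).getD 0
def aMaxR (reds : List (Nat × Nat)) : Nat := (PySem.List.max? (reds.map (fun p => p.1)) (fun x => x)).getD 0
def aMinC (reds : List (Nat × Nat)) : Nat := (PySem.List.min? (reds.map (fun p => p.2)) (fun x => x)).getD 0
def aMaxC (reds : List (Nat × Nat)) : Nat := (PySem.List.max? (reds.map (fun p => p.2)) (fun x => x)).getD 0

def aUpperCols (grid : List (List Int)) (h w mr : Nat) : PySem.Set Nat :=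
  PySem.Set.ofList (((aAccents grid h w).filter (fun t => decide (t.1 < mr))).map (fun t => t.2.1))

def aLowerCols (grid : List (List Int)) (h w Mr : Nat) : PySem.Set Nat :=
  PySem.Set.ofList (((aAccents grid h w).filter (fun t => decide (Mr < t.1))).map (fun t => t.2.1))

def aFillColsU (grid : List (List Int)) (h w mr mc Mc : Nat) : PySem.Set Nat :=
  PySem.Set.ofList ((List.range' mc (Mc + 1 - mc)).filter
    (fun j => !(PySem.Set.contains (aUpperCols grid h w mr) j)))

def aFillColsL (grid : List (List Int)) (h w Mr mc Mc : Nat) : PySem.Set Nat :=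
  PySem.Set.ofList ((List.range' mc (Mc + 1 - mc)).filter
    (fun j => !(PySem.Set.contains (aLowerCols grid h w Mr) j)))

def aUpper (grid : List (List Int)) (h w mr mc Mc : Nat) (out : List (List Int)) : List (List Int) :=
  (List.range mr).foldl (fun g i =>
    g.modify i (aFill (List.range w) (fun j => PySem.Set.contains (aFillColsU grid h w mr mc Mc) j))) out

def aLower (grid : List (List Int)) (h w Mr mc Mc : Nat) (out : List (List Int)) : List (List Int) :=
  (List.range' (Mr + 1) (h - (Mr + 1))).foldl (fun g i =>
    g.modify i (aFill (List.range w) (fun j => PySem.Set.contains (aFillColsL grid h w Mr mc Mc) j))) out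

def aRowAcc (grid : List (List Int)) (w i : Nat) : List (Nat × Int) :=
  ((List.range w).filter (fun j => !(aCell grid i j == 0) && !(aCell grid i j == 2))).map
    (fun j => (j, aCell grid i j))

def aMainStep (grid : List (List Int)) (w mc Mc i : Nat) (g : List (List Int)) : List (List Int) :=
  if aRowAcc grid w i = [] then g.modify i (aFill (List.range w) (fun _ => true))
  else
    let hasL := (aRowAcc grid w i).any (fun p => decide (p.1 < mc))
    let hasR := (aRowAcc grid w i).any (fun p => decide (Mc < p.1))
    let g1 := if hasR then g.modify i (aFill (List.range (Mc + 1)) (fun _ => true)) else g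
    if hasL then g1.modify i (aFill (List.range' mc (w - mc)) (fun _ => true)) else g1

def aMainRows (grid : List (List Int)) (w mr Mr mc Mc : Nat) (out : List (List Int)) : List (List Int) :=
  (List.range' mr (Mr + 1 - mr)).foldl (fun g i => aMainStep grid w mc Mc i g) out

def aGo (grid : List (List Int)) (h w : Nat) : List (List Int) :=
  let reds := aReds grid h w
  if reds = [] then grid.map (fun row => row)
  else
    aMainRows grid w (aMinR reds) (aMaxR reds) (aMinC reds) (aMaxC reds)
      (aLower grid h w (aMaxR reds) (aMinC reds) (aMaxC reds)
        (aUpper grid h w (aMinR reds) (aMinC reds) (aMaxC reds)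
          (grid.map (fun row => row))))

def transform (grid : List (List Int)) : List (List Int) :=
  if grid = [] ∨ grid.headD [] = [] then []
  else aGo grid grid.length (grid.headD []).length

-- ===== PORT B =====
def bCell (grid : List (List Int)) (i j : Nat) : Int :=
  PySem.List.pyGetD (PySem.List.pyGetD grid (i : Int) []) (j : Int) 0

def bAccent (grid : List (List Int)) (i j : Nat) : Bool :=
  !(bCell grid i j == 0) && !(bCell grid i j == 2)

def bRedRows (grid : List (List Int)) (h w : Nat) : List Nat :=
  (List.range h).filter (fun i => (List.range w).any (fun j => bCell grid i j == 2))

def bRedCols (grid : List (List Int)) (h w : Nat) : List Nat :=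
  (List.range w).filter (fun j => (List.range h).any (fun i => bCell grid i j == 2))

-- pure pointwise rule: does cell (i, j) get painted red?
def bPaint (grid : List (List Int)) (h w lo hi left right i j : Nat) : Bool :=
  if i < lo then
    decide (left ≤ j ∧ j ≤ right) && !((List.range lo).any (fun r => bAccent grid r j))
  else if hi < i then
    decide (left ≤ j ∧ j ≤ right) &&
      !((List.range' (hi + 1) (h - (hi + 1))).any (fun r => bAccent grid r j))
  else if !((List.range w).any (fun c => bAccent grid i c)) then true
  else
    (decide (j ≤ right) && (List.range' (right + 1) (w - (right + 1))).any (fun c => bAccent grid i c))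
      || (decide (left ≤ j) && (List.range left).any (fun c => bAccent grid i c))

def bGo (grid : List (List Int)) (h w : Nat) : List (List Int) :=
  if bRedRows grid h w = [] then grid.map (fun row => row)
  else
    let lo := (bRedRows grid h w).headD 0
    let hi := (bRedRows grid h w).getLastD 0
    let left := (bRedCols grid h w).headD 0
    let right := (bRedCols grid h w).getLastD 0
    (List.range h).map (fun i => (List.range w).map (fun j =>
      if bCell grid i j == 0 && bPaint grid h w lo hi left right i j then 2 else bCell grid i j))

def transform_alt (grid : List (List Int)) : List (List Int) :=
  if grid = [] ∨ grid.headD [] = [] then []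
  else bGo grid grid.length (grid.headD []).length

-- ===== PRECONDITION & SPEC =====
-- Pre_ restricts to the natural (ARC) domain of width-uniform grids, plus the ragged grids A
-- handles trivially: a row SHORTER than row 0 makes A raise IndexError, and grids with LONGER
-- rows are kept only when no red (2) cell sits in the scanned columns (A then returns a plain
-- copy, as does B) — with a red cell present, what to do with the never-scanned overhanging
-- cells of a ragged grid is an unspecified corner (A keeps them, B returns uniform-width rows).
def Pre_transform (grid : List (List Int)) : Prop :=
  grid.headD [] = [] ∨
  (∀ row ∈ grid, row.length = (grid.headD []).length) ∨
  ((∀ row ∈ grid, (grid.headD []).length ≤ row.length) ∧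
    ∀ row ∈ grid, ∀ x ∈ row.take (grid.headD []).length, x ≠ 2)
instance (grid : List (List Int)) : Decidable (Pre_transform grid) := by
  unfold Pre_transform; infer_instance

def pvWitness_transform : List (List Int) := [[0, 2, 1], [0, 0, 0], [3, 0, 2]]

def Spec_transform (grid : List (List Int)) (out : List (List Int)) : Prop := out = transform_alt grid
instance (grid : List (List Int)) (out : List (List Int)) : Decidable (Spec_transform grid out) := by
  unfold Spec_transform; infer_instance

-- ===== CLAIM (what is proved, stated in full; the proofs are below) =====
def Claim_equal_transform : Prop :=
  ∀ (grid : List (List Int)), Dom_transform grid → Pre_transform grid →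
    Spec_transform grid (transform grid)

-- ===== LEMMAS AND PROOFS =====

theorem pv_ext_getD {α : Type} (d : α) (l1 l2 : List α) (hl : l1.length = l2.length)
    (h : ∀ k, k < l1.length → l1.getD k d = l2.getD k d) : l1 = l2 := by
  apply List.ext_getElem hl
  intro k h1 h2
  rw [← List.getD_eq_getElem l1 d h1, ← List.getD_eq_getElem l2 d h2]
  exact h k h1

theorem pv_cell_eq (grid : List (List Int)) (i j : Nat) :
    bCell grid i j = (grid.getD i []).getD j 0 := by
  simp [bCell, PySem.List.pyGetD_natCast]

theorem pv_getD_modify {α : Type} (l : List α) (i k : Nat) (f : α → α) (d : α) :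
    (l.modify i f).getD k d = if k = i ∧ k < l.length then f (l.getD k d) else l.getD k d := by
  by_cases hk : k < l.length
  · have hlm : k < (l.modify i f).length := by simpa using hk
    rw [List.getD_eq_getElem _ _ hlm, List.getD_eq_getElem _ _ hk, List.getElem_modify]
    by_cases hik : k = i
    · subst hik; simp [hk]
    · rw [if_neg (fun h : i = k => hik h.symm), if_neg (by simp [hik])]
  · have h1 : l.length ≤ k := le_of_not_gt hk
    have h2 : (l.modify i f).length ≤ k := by simpa using h1
    rw [List.getD_eq_default _ _ h1, List.getD_eq_default _ _ h2]
    simp [hk]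

theorem pv_modify_id {α : Type} (l : List α) (i : Nat) :
    l.modify i (fun v => v) = l := by
  by_cases h : i < l.length
  · rw [List.modify_eq_set_get _ h]
    exact List.set_getElem_self h
  · exact List.modify_eq_self (le_of_not_gt h)

theorem pv_fold_modify_length {α : Type} (f : Nat → α → α) (is : List Nat) (g : List α) :
    (is.foldl (fun g i => g.modify i (f i)) g).length = g.length := by
  induction is generalizing g with
  | nil => rfl
  | cons a t ih => simp [List.foldl_cons, ih, List.length_modify]

theorem pv_fold_modify_getD {α : Type} (d : α) (f : Nat → α → α) (is : List Nat) (g : List α)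
    (hnd : is.Nodup) (k : Nat) :
    (is.foldl (fun g i => g.modify i (f i)) g).getD k d =
      if k ∈ is ∧ k < g.length then f k (g.getD k d) else g.getD k d := by
  induction is generalizing g with
  | nil => simp
  | cons a t ih =>
    obtain ⟨ha, ht⟩ := List.nodup_cons.mp hnd
    rw [List.foldl_cons, ih _ ht, pv_getD_modify]
    simp only [List.length_modify, List.mem_cons]
    by_cases hkt : k ∈ t <;> by_cases hka : k = a <;> by_cases hkl : k < g.length <;>
      simp_all

theorem pv_fill_eq_modify (js : List Nat) (c : Nat → Bool) (row : List Int) :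
    aFill js c row = js.foldl (fun r j => r.modify j (fun v => if v == 0 && c j then 2 else v)) row := by
  unfold aFill
  have hfun : (fun (r : List Int) j => if r.getD j 0 == 0 && c j then r.set j 2 else r) =
      (fun (r : List Int) j => r.modify j (fun v => if v == 0 && c j then 2 else v)) := by
    funext r j
    by_cases hj : j < r.length
    · rw [List.modify_eq_set_get _ hj, List.getD_eq_getElem _ _ hj]
      by_cases hv : r[j] == 0 && c j
      · simp [hv]
      · simp [hv, List.set_getElem_self hj]
    · rw [List.modify_eq_self (le_of_not_gt hj), List.set_eq_of_length_le (le_of_not_gt hj)]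
      simp
  rw [hfun]

theorem pv_fill_length (js : List Nat) (c : Nat → Bool) (row : List Int) :
    (aFill js c row).length = row.length := by
  rw [pv_fill_eq_modify]; exact pv_fold_modify_length _ js row

theorem pv_fill_getD (js : List Nat) (hnd : js.Nodup) (c : Nat → Bool) (row : List Int) (j : Nat) :
    (aFill js c row).getD j 0 =
      if j ∈ js ∧ j < row.length then
        (if row.getD j 0 == 0 && c j then 2 else row.getD j 0)
      else row.getD j 0 := by
  rw [pv_fill_eq_modify, pv_fold_modify_getD 0 (fun j v => if v == 0 && c j then 2 else v) js row hnd j]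

-- proof-side single-modify form of the per-row action of A's main loop
def aMainF (grid : List (List Int)) (w mc Mc i : Nat) (row : List Int) : List Int :=
  if aRowAcc grid w i = [] then aFill (List.range w) (fun _ => true) row
  else
    let r1 := if (aRowAcc grid w i).any (fun p => decide (Mc < p.1)) then
        aFill (List.range (Mc + 1)) (fun _ => true) row else row
    if (aRowAcc grid w i).any (fun p => decide (p.1 < mc)) then
      aFill (List.range' mc (w - mc)) (fun _ => true) r1 else r1

theorem pv_mainStep_eq (grid : List (List Int)) (w mc Mc i : Nat) (g : List (List Int)) :
    aMainStep grid w mc Mc i g = g.modify i (aMainF grid w mc Mc i) := by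
  unfold aMainStep aMainF
  by_cases h0 : aRowAcc grid w i = []
  · simp [h0]
  · simp only [h0, if_false]
    by_cases hR : (aRowAcc grid w i).any (fun p => decide (Mc < p.1)) <;>
      by_cases hL : (aRowAcc grid w i).any (fun p => decide (p.1 < mc)) <;>
        simp [hR, hL, List.modify_modify_eq, pv_modify_id]
    rfl

-- A's painted grid, row by row
theorem pv_A_getD (grid : List (List Int)) (h w mr Mr mc Mc : Nat)
    (hh : grid.length = h) (hmrMr : mr ≤ Mr) (hMr : Mr < h) (k : Nat) :
    (aMainRows grid w mr Mr mc Mc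
      (aLower grid h w Mr mc Mc (aUpper grid h w mr mc Mc (grid.map (fun row => row))))).getD k [] =
      if k < mr then
        aFill (List.range w) (fun j => PySem.Set.contains (aFillColsU grid h w mr mc Mc) j) (grid.getD k [])
      else if Mr < k ∧ k < h then
        aFill (List.range w) (fun j => PySem.Set.contains (aFillColsL grid h w Mr mc Mc) j) (grid.getD k [])
      else if mr ≤ k ∧ k ≤ Mr then aMainF grid w mc Mc k (grid.getD k [])
      else grid.getD k [] := by
  unfold aMainRows aLower aUpper
  simp only [pv_mainStep_eq]
  rw [pv_fold_modify_getD _ _ _ _ List.nodup_range' k,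
      pv_fold_modify_getD _ _ _ _ List.nodup_range' k,
      pv_fold_modify_getD _ _ _ _ List.nodup_range k]
  simp only [pv_fold_modify_length, List.map_id', List.mem_range,
    List.mem_range'_1, hh]
  have hMr' : Mr + 1 + (h - (Mr + 1)) = h := by omega
  have hmr' : mr + (Mr + 1 - mr) = Mr + 1 := by omega
  rw [hMr', hmr']
  split_ifs <;> first | rfl | omega

theorem pv_A_length (grid : List (List Int)) (h w mr Mr mc Mc : Nat) (hh : grid.length = h) :
    (aMainRows grid w mr Mr mc Mc
      (aLower grid h w Mr mc Mc (aUpper grid h w mr mc Mc (grid.map (fun row => row))))).length = h := by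
  unfold aMainRows aLower aUpper
  simp only [pv_mainStep_eq]
  rw [pv_fold_modify_length, pv_fold_modify_length, pv_fold_modify_length]
  simp [hh]

-- A's upper/lower accent-column set tested at j equals B's direct column scan
theorem pv_upperAny (grid : List (List Int)) (h w mr j : Nat) (hmr : mr ≤ h) (hjw : j < w) :
    PySem.Set.contains (aUpperCols grid h w mr) j = (List.range mr).any (fun r => bAccent grid r j) := by
  apply Bool.coe_iff_coe.mp
  rw [PySem.Set.contains_iff]
  simp only [aUpperCols, aAccents, aCell, bAccent, pv_cell_eq, PySem.Set.mem_ofList,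
    List.mem_map, List.mem_filter, List.mem_flatMap, List.mem_range, List.any_eq_true]
  constructor
  · rintro ⟨t, ⟨⟨i, hih, j', ⟨hj'w, hcond⟩, rfl⟩, hlt⟩, rfl⟩
    exact ⟨i, by simpa using hlt, hcond⟩
  · rintro ⟨i, hilt, hcond⟩
    exact ⟨(i, j, (grid.getD i []).getD j 0), ⟨⟨i, lt_of_lt_of_le hilt hmr, j, ⟨hjw, hcond⟩, rfl⟩, by simpa using hilt⟩, rfl⟩

theorem pv_lowerAny (grid : List (List Int)) (h w Mr j : Nat) (hjw : j < w) :
    PySem.Set.contains (aLowerCols grid h w Mr) j =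
      (List.range' (Mr + 1) (h - (Mr + 1))).any (fun r => bAccent grid r j) := by
  apply Bool.coe_iff_coe.mp
  rw [PySem.Set.contains_iff]
  simp only [aLowerCols, aAccents, aCell, bAccent, pv_cell_eq, PySem.Set.mem_ofList,
    List.mem_map, List.mem_filter, List.mem_flatMap, List.mem_range, List.mem_range'_1,
    List.any_eq_true]
  constructor
  · rintro ⟨t, ⟨⟨i, hih, j', ⟨hj'w, hcond⟩, rfl⟩, hlt⟩, rfl⟩
    exact ⟨i, ⟨by simpa using hlt, by omega⟩, hcond⟩
  · rintro ⟨i, ⟨hgt, hlt⟩, hcond⟩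
    exact ⟨(i, j, (grid.getD i []).getD j 0), ⟨⟨i, by omega, j, ⟨hjw, hcond⟩, rfl⟩, by simpa using hgt⟩, rfl⟩

theorem pv_getD_map_range {α : Type} (d : α) (w j : Nat) (f : Nat → α) (hj : j < w) :
    ((List.range w).map f).getD j d = f j := by
  rw [List.getD_eq_getElem _ _ (by simpa using hj)]
  simp

theorem pv_sorted_headD (l : List Nat) (d x : Nat) (hx : x ∈ l) (hlb : ∀ y ∈ l, x ≤ y)
    (hp : l.Pairwise (· < ·)) : l.headD d = x := by
  cases l with
  | nil => cases hx
  | cons a t =>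
    have h1 : x ≤ a := hlb a List.mem_cons_self
    rcases List.mem_cons.mp hx with rfl | hxt
    · rfl
    · have := (List.pairwise_cons.mp hp).1 x hxt
      omega

theorem pv_sorted_getLastD (l : List Nat) (d x : Nat) (hx : x ∈ l) (hub : ∀ y ∈ l, y ≤ x)
    (hp : l.Pairwise (· < ·)) : l.getLastD d = x := by
  induction l generalizing d with
  | nil => cases hx
  | cons a t ih =>
    rw [List.getLastD_cons]
    obtain ⟨hat, htp⟩ := List.pairwise_cons.mp hp
    cases t with
    | nil => exact (List.mem_singleton.mp hx).symm
    | cons b t' =>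
      apply ih
      · rcases List.mem_cons.mp hx with rfl | hxt
        · have := hat b List.mem_cons_self
          have := hub b (by simp)
          omega
        · exact hxt
      · intro y hy
        exact hub y (List.mem_cons_of_mem a hy)
      · exact htp

theorem pv_rowU (grid : List (List Int)) (h w mr Mr mc Mc k : Nat) (hk : k < mr) (hmr : mr ≤ h)
    (hrow : (grid.getD k []).length = w) :
    aFill (List.range w) (fun j => PySem.Set.contains (aFillColsU grid h w mr mc Mc) j) (grid.getD k []) =
      (List.range w).map (fun j =>
        if bCell grid k j == 0 && bPaint grid h w mr Mr mc Mc k j then 2 else bCell grid k j) := by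
  simp only [pv_cell_eq]
  apply pv_ext_getD 0
  · rw [pv_fill_length, hrow]; simp
  · intro j hj
    rw [pv_fill_length, hrow] at hj
    rw [pv_fill_getD _ List.nodup_range _ _ j, pv_getD_map_range 0 w j _ hj]
    simp only [List.mem_range, hrow]
    rw [if_pos ⟨hj, hj⟩]
    have hcontU : PySem.Set.contains (aFillColsU grid h w mr mc Mc) j =
        (decide (mc ≤ j ∧ j ≤ Mc) && !((List.range mr).any (fun r => bAccent grid r j))) := by
      apply Bool.coe_iff_coe.mp
      rw [PySem.Set.contains_iff]
      simp only [aFillColsU, PySem.Set.mem_ofList, List.mem_filter, List.mem_range'_1,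
        pv_upperAny grid h w mr j hmr hj, Bool.and_eq_true, Bool.not_eq_true', decide_eq_true_eq]
      constructor
      · rintro ⟨⟨h1, h2⟩, h3⟩; exact ⟨⟨h1, by omega⟩, h3⟩
      · rintro ⟨⟨h1, h2⟩, h3⟩; exact ⟨⟨h1, by omega⟩, h3⟩
    rw [hcontU, bPaint, if_pos hk]

theorem pv_rowL (grid : List (List Int)) (h w mr Mr mc Mc k : Nat) (hk1 : Mr < k) (hk2 : ¬ k < mr)
    (hrow : (grid.getD k []).length = w) :
    aFill (List.range w) (fun j => PySem.Set.contains (aFillColsL grid h w Mr mc Mc) j) (grid.getD k []) =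
      (List.range w).map (fun j =>
        if bCell grid k j == 0 && bPaint grid h w mr Mr mc Mc k j then 2 else bCell grid k j) := by
  simp only [pv_cell_eq]
  apply pv_ext_getD 0
  · rw [pv_fill_length, hrow]; simp
  · intro j hj
    rw [pv_fill_length, hrow] at hj
    rw [pv_fill_getD _ List.nodup_range _ _ j, pv_getD_map_range 0 w j _ hj]
    simp only [List.mem_range, hrow]
    rw [if_pos ⟨hj, hj⟩]
    have hcontL : PySem.Set.contains (aFillColsL grid h w Mr mc Mc) j =
        (decide (mc ≤ j ∧ j ≤ Mc) &&
          !((List.range' (Mr + 1) (h - (Mr + 1))).any (fun r => bAccent grid r j))) := by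
      apply Bool.coe_iff_coe.mp
      rw [PySem.Set.contains_iff]
      simp only [aFillColsL, PySem.Set.mem_ofList, List.mem_filter, List.mem_range'_1,
        pv_lowerAny grid h w Mr j hj, Bool.and_eq_true, Bool.not_eq_true', decide_eq_true_eq]
      constructor
      · rintro ⟨⟨h1, h2⟩, h3⟩; exact ⟨⟨h1, by omega⟩, h3⟩
      · rintro ⟨⟨h1, h2⟩, h3⟩; exact ⟨⟨h1, by omega⟩, h3⟩
    rw [hcontL, bPaint, if_neg hk2, if_pos hk1]

theorem pv_rowM (grid : List (List Int)) (h w mr Mr mc Mc k : Nat) (hk1 : ¬ k < mr) (hk2 : ¬ Mr < k)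
    (hmc : mc ≤ Mc) (hMc : Mc < w) (hrow : (grid.getD k []).length = w) :
    aMainF grid w mc Mc k (grid.getD k []) =
      (List.range w).map (fun j =>
        if bCell grid k j == 0 && bPaint grid h w mr Mr mc Mc k j then 2 else bCell grid k j) := by
  have hacc : aRowAcc grid w k = ((List.range w).filter (fun j => bAccent grid k j)).map
      (fun j => (j, aCell grid k j)) := by
    simp only [aRowAcc, bAccent, pv_cell_eq, aCell]
  have hempty : (aRowAcc grid w k = []) ↔ ((List.range w).any (fun c => bAccent grid k c) = false) := by
    rw [hacc]
    simp [List.filter_eq_nil_iff, List.any_eq_false]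
  have hR : (aRowAcc grid w k).any (fun p => decide (Mc < p.1)) =
      (List.range' (Mc + 1) (w - (Mc + 1))).any (fun c => bAccent grid k c) := by
    rw [hacc, List.any_map]
    apply Bool.coe_iff_coe.mp
    simp only [List.any_eq_true, List.mem_filter, List.mem_range, List.mem_range'_1,
      Function.comp, decide_eq_true_eq]
    constructor
    · rintro ⟨j, ⟨⟨hjw, hc⟩, hlt⟩⟩; exact ⟨j, ⟨by omega, by omega⟩, hc⟩
    · rintro ⟨j, ⟨h1, h2⟩, hc⟩; exact ⟨j, ⟨⟨by omega, hc⟩, by omega⟩⟩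
  have hL : (aRowAcc grid w k).any (fun p => decide (p.1 < mc)) =
      (List.range mc).any (fun c => bAccent grid k c) := by
    rw [hacc, List.any_map]
    apply Bool.coe_iff_coe.mp
    simp only [List.any_eq_true, List.mem_filter, List.mem_range, Function.comp, decide_eq_true_eq]
    constructor
    · rintro ⟨j, ⟨⟨hjw, hc⟩, hlt⟩⟩; exact ⟨j, hlt, hc⟩
    · rintro ⟨j, h1, hc⟩; exact ⟨j, ⟨⟨by omega, hc⟩, h1⟩⟩
  have hpaint : ∀ j, bPaint grid h w mr Mr mc Mc k j =
      if (aRowAcc grid w k) = [] then true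
      else ((decide (j ≤ Mc) && (aRowAcc grid w k).any (fun p => decide (Mc < p.1)))
        || (decide (mc ≤ j) && (aRowAcc grid w k).any (fun p => decide (p.1 < mc)))) := by
    intro j
    rw [bPaint, if_neg hk1, if_neg hk2, hR, hL]
    by_cases h0 : aRowAcc grid w k = []
    · rw [if_pos h0]
      have := hempty.mp h0
      simp [this]
    · rw [if_neg h0]
      have hne : ¬ ((List.range w).any (fun c => bAccent grid k c) = false) :=
        fun hx => h0 (hempty.mpr hx)
      rw [if_neg (by simp at hne ⊢; simp [hne])]
  unfold aMainF
  by_cases h0 : aRowAcc grid w k = []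
  · rw [if_pos h0]
    apply pv_ext_getD 0
    · rw [pv_fill_length, hrow]; simp
    · intro j hj
      rw [pv_fill_length, hrow] at hj
      rw [pv_fill_getD _ List.nodup_range _ _ j, pv_getD_map_range 0 w j _ hj, hpaint j,
          if_pos h0, pv_cell_eq]
      simp only [List.mem_range, hrow]
      rw [if_pos ⟨hj, hj⟩]
  · rw [if_neg h0]
    by_cases hRb : (aRowAcc grid w k).any (fun p => decide (Mc < p.1)) = true
    · by_cases hLb : (aRowAcc grid w k).any (fun p => decide (p.1 < mc)) = true
      · simp only [hRb, hLb, if_true]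
        apply pv_ext_getD 0
        · rw [pv_fill_length, pv_fill_length, hrow]; simp
        · intro j hj
          rw [pv_fill_length, pv_fill_length, hrow] at hj
          rw [pv_fill_getD _ List.nodup_range' _ _ j, pv_getD_map_range 0 w j _ hj,
              pv_fill_getD _ List.nodup_range _ _ j, pv_fill_length, hrow, hpaint j,
              if_neg h0, hRb, hLb, pv_cell_eq]
          simp only [List.mem_range, List.mem_range'_1, Bool.and_true, Bool.or_eq_true,
            Bool.and_eq_true, decide_eq_true_eq]
          by_cases hv : (grid.getD k []).getD j 0 == 0 <;>
            by_cases hj1 : j < Mc + 1 <;> by_cases hj2 : mc ≤ j ∧ j < mc + (w - mc) <;>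
              simp [hj1, hj2, hj] <;> omega
      · simp only [hRb, eq_false_of_ne_true hLb, if_true, Bool.false_eq_true, if_false]
        apply pv_ext_getD 0
        · rw [pv_fill_length, hrow]; simp
        · intro j hj
          rw [pv_fill_length, hrow] at hj
          rw [pv_fill_getD _ List.nodup_range _ _ j, pv_getD_map_range 0 w j _ hj, hrow,
              hpaint j, if_neg h0, hRb, eq_false_of_ne_true hLb, pv_cell_eq]
          simp only [List.mem_range, Bool.and_true, Bool.and_false, Bool.or_false]
          by_cases hv : (grid.getD k []).getD j 0 == 0 <;>
            by_cases hj1 : j < Mc + 1 <;> simp [hj1, hj] <;> omega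
    · by_cases hLb : (aRowAcc grid w k).any (fun p => decide (p.1 < mc)) = true
      · simp only [eq_false_of_ne_true hRb, hLb, Bool.false_eq_true, if_false, if_true]
        apply pv_ext_getD 0
        · rw [pv_fill_length, hrow]; simp
        · intro j hj
          rw [pv_fill_length, hrow] at hj
          rw [pv_fill_getD _ List.nodup_range' _ _ j, pv_getD_map_range 0 w j _ hj, hrow,
              hpaint j, if_neg h0, eq_false_of_ne_true hRb, hLb, pv_cell_eq]
          simp only [List.mem_range'_1, Bool.and_true, Bool.and_false, Bool.false_or]
          by_cases hv : (grid.getD k []).getD j 0 == 0 <;>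
            by_cases hj2 : mc ≤ j ∧ j < mc + (w - mc) <;> simp [hj2, hj] <;> omega
      · simp only [eq_false_of_ne_true hRb, eq_false_of_ne_true hLb, Bool.false_eq_true, if_false]
        apply pv_ext_getD 0
        · rw [hrow]; simp
        · intro j hj
          rw [hrow] at hj
          rw [pv_getD_map_range 0 w j _ hj, hpaint j, if_neg h0, eq_false_of_ne_true hRb,
              eq_false_of_ne_true hLb, pv_cell_eq]
          simp

-- ===== VERDICT (by name: the statement is the Claim_ definition above) =====
theorem transform_spec : Claim_equal_transform := by
  intro grid _ hpre
  unfold Spec_transform transform transform_alt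
  by_cases h0 : grid = [] ∨ grid.headD [] = []
  · rw [if_pos h0, if_pos h0]
  · rw [if_neg h0, if_neg h0]
    rw [not_or] at h0
    have hbr : (bRedRows grid grid.length (grid.headD []).length = []) ↔
        (aReds grid grid.length (grid.headD []).length = []) := by
      simp only [bRedRows, aReds, List.filter_eq_nil_iff, List.flatMap_eq_nil_iff,
        List.map_eq_nil_iff, List.mem_range, List.any_eq_true, pv_cell_eq, aCell,
        beq_iff_eq, not_exists, not_and]
    by_cases hr : aReds grid grid.length (grid.headD []).length = []
    · simp only [aGo, bGo]
      rw [if_pos hr, if_pos (hbr.mpr hr)]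
    · simp only [aGo, bGo, if_neg hr, if_neg (fun hx => hr (hbr.mp hx))]
      set h := grid.length with hh
      set w := (grid.headD []).length with hw
      set reds := aReds grid h w with hreds
      set mr := aMinR reds with hmr
      set Mr := aMaxR reds with hMr
      set mc := aMinC reds with hmc
      set Mc := aMaxC reds with hMc
      have hw0 : 0 < w := by
        rcases grid with _ | ⟨r0, rest⟩
        · exact absurd rfl h0.1
        · simpa [hw] using List.length_pos_iff.mpr h0.2
      have hmem : ∀ p : Nat × Nat, p ∈ reds ↔
          p.1 < h ∧ p.2 < w ∧ (grid.getD p.1 []).getD p.2 0 = 2 := by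
        intro p
        rw [hreds]
        simp only [aReds, aCell, List.mem_flatMap, List.mem_map, List.mem_filter, List.mem_range]
        constructor
        · rintro ⟨i, hih, j, ⟨hjw, hc⟩, rfl⟩
          exact ⟨hih, hjw, by simpa using hc⟩
        · rintro ⟨h1, h2, h3⟩
          exact ⟨p.1, h1, p.2, ⟨h2, by simpa using h3⟩, rfl⟩
      obtain ⟨p0, hp0⟩ := List.exists_mem_of_ne_nil reds hr
      have hrect : ∀ k, k < h → (grid.getD k []).length = w := by
        intro k hk
        have hkk : k < grid.length := hk
        rw [List.getD_eq_getElem _ _ hkk]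
        rcases hpre with hp | hp | hp
        · exact absurd hp h0.2
        · exact hp _ (List.getElem_mem hkk)
        · exfalso
          obtain ⟨h1, h2, h3⟩ := (hmem p0).mp hp0
          have hk1 : p0.1 < grid.length := h1
          have hwle : w ≤ grid[p0.1].length :=
            hp.1 _ (List.getElem_mem hk1)
          have htk : p0.2 < (grid[p0.1].take w).length := by
            simp only [List.length_take]
            omega
          have hx2 : (grid[p0.1].take w)[p0.2] = (2 : Int) := by
            rw [List.getElem_take]
            rw [List.getD_eq_getElem _ _ hk1] at h3
            rw [← List.getD_eq_getElem _ 0 (by omega), h3]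
          exact hp.2 _ (List.getElem_mem hk1) _ (List.getElem_mem htk) hx2
      have hmapr : reds.map (fun p : Nat × Nat => p.1) ≠ [] := by simpa using hr
      have hmapc : reds.map (fun p : Nat × Nat => p.2) ≠ [] := by simpa using hr
      have hminr : PySem.List.min? (reds.map (fun p : Nat × Nat => p.1)) (fun x => x) = some mr := by
        cases hm : PySem.List.min? (reds.map (fun p : Nat × Nat => p.1)) (fun x => x) with
        | none => exact absurd ((PySem.List.min?_eq_none_iff _ _).mp hm) hmapr
        | some m => rw [hmr, aMinR, hm]; rfl
      have hmaxr : PySem.List.max? (reds.map (fun p : Nat × Nat => p.1)) (fun x => x) = some Mr := by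
        cases hm : PySem.List.max? (reds.map (fun p : Nat × Nat => p.1)) (fun x => x) with
        | none => exact absurd ((PySem.List.max?_eq_none_iff _ _).mp hm) hmapr
        | some m => rw [hMr, aMaxR, hm]; rfl
      have hminc : PySem.List.min? (reds.map (fun p : Nat × Nat => p.2)) (fun x => x) = some mc := by
        cases hm : PySem.List.min? (reds.map (fun p : Nat × Nat => p.2)) (fun x => x) with
        | none => exact absurd ((PySem.List.min?_eq_none_iff _ _).mp hm) hmapc
        | some m => rw [hmc, aMinC, hm]; rfl
      have hmaxc : PySem.List.max? (reds.map (fun p : Nat × Nat => p.2)) (fun x => x) = some Mc := by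
        cases hm : PySem.List.max? (reds.map (fun p : Nat × Nat => p.2)) (fun x => x) with
        | none => exact absurd ((PySem.List.max?_eq_none_iff _ _).mp hm) hmapc
        | some m => rw [hMc, aMaxC, hm]; rfl
      have hmrMr : mr ≤ Mr := by
        have h1 := PySem.List.min?_id_le hminr p0.1 (List.mem_map_of_mem hp0)
        have h2 := PySem.List.max?_id_le hmaxr p0.1 (List.mem_map_of_mem hp0)
        omega
      have hMrh : Mr < h := by
        obtain ⟨p, hp, hpe⟩ := List.mem_map.mp (PySem.List.max?_mem hmaxr)
        have := (hmem p).mp hp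
        omega
      have hmcMc : mc ≤ Mc := by
        have h1 := PySem.List.min?_id_le hminc p0.2 (List.mem_map_of_mem hp0)
        have h2 := PySem.List.max?_id_le hmaxc p0.2 (List.mem_map_of_mem hp0)
        omega
      have hMcw : Mc < w := by
        obtain ⟨p, hp, hpe⟩ := List.mem_map.mp (PySem.List.max?_mem hmaxc)
        have := (hmem p).mp hp
        omega
      have hrowsmem : ∀ i, i ∈ bRedRows grid h w ↔ ∃ p : Nat × Nat, p ∈ reds ∧ p.1 = i := by
        intro i
        simp only [bRedRows, List.mem_filter, List.mem_range, List.any_eq_true, pv_cell_eq]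
        constructor
        · rintro ⟨hih, j, hj, hc⟩
          exact ⟨(i, j), (hmem _).mpr ⟨hih, by simpa using hj, by simpa using hc⟩, rfl⟩
        · rintro ⟨p, hp, rfl⟩
          have := (hmem p).mp hp
          exact ⟨this.1, p.2, by simpa using this.2.1, by simpa using this.2.2⟩
      have hcolsmem : ∀ j, j ∈ bRedCols grid h w ↔ ∃ p : Nat × Nat, p ∈ reds ∧ p.2 = j := by
        intro j
        simp only [bRedCols, List.mem_filter, List.mem_range, List.any_eq_true, pv_cell_eq]
        constructor
        · rintro ⟨hjw, i, hi, hc⟩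
          exact ⟨(i, j), (hmem _).mpr ⟨by simpa using hi, hjw, by simpa using hc⟩, rfl⟩
        · rintro ⟨p, hp, rfl⟩
          have := (hmem p).mp hp
          exact ⟨this.2.1, p.1, by simpa using this.1, by simpa using this.2.2⟩
      have hrowsp : (bRedRows grid h w).Pairwise (· < ·) :=
        List.Pairwise.filter _ (List.pairwise_lt_range)
      have hcolsp : (bRedCols grid h w).Pairwise (· < ·) :=
        List.Pairwise.filter _ (List.pairwise_lt_range)
      have e_mr : (bRedRows grid h w).headD 0 = mr := by
        apply pv_sorted_headD _ _ _ _ _ hrowsp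
        · obtain ⟨p, hp, hpe⟩ := List.mem_map.mp (PySem.List.min?_mem hminr)
          exact (hrowsmem mr).mpr ⟨p, hp, hpe⟩
        · intro y hy
          obtain ⟨p, hp, rfl⟩ := (hrowsmem y).mp hy
          exact PySem.List.min?_id_le hminr p.1 (List.mem_map_of_mem hp)
      have e_Mr : (bRedRows grid h w).getLastD 0 = Mr := by
        apply pv_sorted_getLastD _ _ _ _ _ hrowsp
        · obtain ⟨p, hp, hpe⟩ := List.mem_map.mp (PySem.List.max?_mem hmaxr)
          exact (hrowsmem Mr).mpr ⟨p, hp, hpe⟩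
        · intro y hy
          obtain ⟨p, hp, rfl⟩ := (hrowsmem y).mp hy
          exact PySem.List.max?_id_le hmaxr p.1 (List.mem_map_of_mem hp)
      have e_mc : (bRedCols grid h w).headD 0 = mc := by
        apply pv_sorted_headD _ _ _ _ _ hcolsp
        · obtain ⟨p, hp, hpe⟩ := List.mem_map.mp (PySem.List.min?_mem hminc)
          exact (hcolsmem mc).mpr ⟨p, hp, hpe⟩
        · intro y hy
          obtain ⟨p, hp, rfl⟩ := (hcolsmem y).mp hy
          exact PySem.List.min?_id_le hminc p.2 (List.mem_map_of_mem hp)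
      have e_Mc : (bRedCols grid h w).getLastD 0 = Mc := by
        apply pv_sorted_getLastD _ _ _ _ _ hcolsp
        · obtain ⟨p, hp, hpe⟩ := List.mem_map.mp (PySem.List.max?_mem hmaxc)
          exact (hcolsmem Mc).mpr ⟨p, hp, hpe⟩
        · intro y hy
          obtain ⟨p, hp, rfl⟩ := (hcolsmem y).mp hy
          exact PySem.List.max?_id_le hmaxc p.2 (List.mem_map_of_mem hp)
      rw [e_mr, e_Mr, e_mc, e_Mc]
      apply pv_ext_getD []
      · rw [pv_A_length grid h w mr Mr mc Mc rfl]
        simp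
      · intro k hk
        rw [pv_A_length grid h w mr Mr mc Mc rfl] at hk
        rw [pv_A_getD grid h w mr Mr mc Mc rfl hmrMr hMrh k,
            pv_getD_map_range [] h k _ hk]
        by_cases h1 : k < mr
        · rw [if_pos h1]
          exact pv_rowU grid h w mr Mr mc Mc k h1 (by omega) (hrect k hk)
        · rw [if_neg h1]
          by_cases h2 : Mr < k
          · rw [if_pos ⟨h2, hk⟩]
            exact pv_rowL grid h w mr Mr mc Mc k h2 h1 (hrect k hk)
          · rw [if_neg (by omega), if_pos (by omega)]
            exact pv_rowM grid h w mr Mr mc Mc k h1 h2 hmcMc hMcw (hrect k hk)
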